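-- pv_equiv track=rewrite | github.com/paulbarmstrong/advent-of-code-2017-solutions | day4/day4.py | part_one
-- ===== SOURCE A (Python) =====
-- def part_one(phrases):
--
-- 	# Keep track of the number of valid phrases
-- 	valid_phrase_count = 0
--
-- 	for phrase in phrases:
--
-- 		word_list = phrase.strip('\n').split(' ')
-- 		has_repeat = False
--
-- 		# This will be a set of words
-- 		words_set = set()
--
-- 		# Fill the set with words
-- 		for word in word_list:
--
-- 			# If the word is already in the set, there is a repeat
-- 			if (word in words_set):
-- 				has_repeat = True
-- 			words_set.add(word)
--
-- 		if (not has_repeat):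
-- 			valid_phrase_count += 1
--
-- 	return valid_phrase_count;
-- ===== SOURCE B (Python) =====
-- def part_one(phrases):
--     def valid(phrase):
--         ws = sorted(phrase.strip('\n').split(' '))
--         return all(a != b for a, b in zip(ws, ws[1:]))
--     return sum(1 for p in phrases if valid(p))
-- ===== Notes on version B (the rewrite author's own statement) =====
-- stated objective: idiomatic
-- what changed: Replaces the per-phrase hash-set membership loop with a sort-then-adjacent-scan duplicate test (sorted copy, all adjacent pairs distinct) expressed as a comprehension sum.
import Mathlib
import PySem

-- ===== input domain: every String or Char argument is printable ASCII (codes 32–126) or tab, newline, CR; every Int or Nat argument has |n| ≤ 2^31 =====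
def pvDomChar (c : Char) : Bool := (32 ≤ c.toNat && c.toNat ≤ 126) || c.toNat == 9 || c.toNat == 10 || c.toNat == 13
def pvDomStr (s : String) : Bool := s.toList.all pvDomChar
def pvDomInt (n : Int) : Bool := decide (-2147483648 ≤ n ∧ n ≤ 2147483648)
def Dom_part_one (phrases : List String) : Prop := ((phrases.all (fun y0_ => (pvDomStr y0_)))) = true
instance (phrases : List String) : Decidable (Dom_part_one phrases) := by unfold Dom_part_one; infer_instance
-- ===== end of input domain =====

-- B replaces A's per-phrase hash-set membership loop with a sort-then-adjacent-pair duplicate scan (idiomatic, not faster).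


-- shared Python tokenization phrase.strip('\n').split(' '): sep " " is nonempty so split? is always some; getD only totalizes
def pvWords (p : String) : List String :=
  (PySem.Str.split? (PySem.Str.stripChars p "\n") " ").getD []

-- ===== PORT A =====
-- inner loop of A: for word in word_list: if word in words_set: has_repeat = True; words_set.add(word)
def pvAInner (word_list : List String) : Bool × PySem.Set String :=
  word_list.foldl
    (fun st word =>
      ((if PySem.Set.contains st.2 word then true else st.1), PySem.Set.add st.2 word))
    (false, PySem.Set.empty)

def part_one (phrases : List String) : Int :=
  phrases.foldl
    (fun valid_phrase_count phrase =>
      let word_list := pvWords phrase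
      let has_repeat := (pvAInner word_list).1
      if ¬ (has_repeat = true) then valid_phrase_count + 1 else valid_phrase_count)
    0

-- ===== PORT B =====
def pvValidB (phrase : String) : Bool :=
  let ws := PySem.List.sorted (pvWords phrase)
              (fun w => w) false
  (ws.zip ws.tail).all (fun ab => ab.1 != ab.2)

def part_one_alt (phrases : List String) : Int :=
  ((phrases.countP pvValidB : Nat) : Int)

-- ===== PRECONDITION & SPEC =====
def Spec_part_one (phrases : List String) (out : Int) : Prop := out = part_one_alt phrases
instance (phrases : List String) (out : Int) : Decidable (Spec_part_one phrases out) := by unfold Spec_part_one; infer_instance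

-- ===== CLAIM (what is proved, stated in full; the proofs are below) =====
def Claim_equal_part_one : Prop := ∀ (phrases : List String), Dom_part_one phrases → Spec_part_one phrases (part_one phrases)

-- ===== LEMMAS AND PROOFS =====

-- A's inner loop flag: true iff a word of ws already lies in s or ws itself has a duplicate
lemma pvAInner_loop (ws : List String) (r : Bool) (s : PySem.Set String) :
    (ws.foldl (fun st word =>
        ((if PySem.Set.contains st.2 word then true else st.1), PySem.Set.add st.2 word))
      (r, s)).1
    = (r || decide (∃ w ∈ ws, w ∈ s) || decide (¬ ws.Nodup)) := by
  induction ws generalizing r s with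
  | nil => simp
  | cons w ws ih =>
    simp only [List.foldl_cons, ih]
    have hc : PySem.Set.contains s w = decide (w ∈ s) := by
      cases hcb : PySem.Set.contains s w <;> simp_all
    have h1 : (∃ v ∈ ws, v ∈ s ∨ v = w) ↔ ((∃ v ∈ ws, v ∈ s) ∨ w ∈ ws) := by
      constructor
      · rintro ⟨v, hv, hvs | rfl⟩
        · exact Or.inl ⟨v, hv, hvs⟩
        · exact Or.inr hv
      · rintro (⟨v, hv, hvs⟩ | hwm)
        · exact ⟨v, hv, Or.inl hvs⟩
        · exact ⟨w, hwm, Or.inr rfl⟩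
    rw [hc]
    by_cases pw : w ∈ s <;> by_cases pm : w ∈ ws <;>
      by_cases pe : ∃ v ∈ ws, v ∈ s <;> by_cases pn : ws.Nodup <;>
      simp [h1, pw, pm, pe, pn, List.nodup_cons]

lemma pvAInner_eq (ws : List String) : (pvAInner ws).1 = decide (¬ ws.Nodup) := by
  have := pvAInner_loop ws false PySem.Set.empty
  simpa [pvAInner, PySem.Set.empty] using this

-- adjacent-pair scan of a ≤-sorted list detects exactly the duplicates
lemma adj_all_ne_of_pairwise {ys : List String}
    (hp : ys.Pairwise (fun a b => a ≤ b)) :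
    ((ys.zip ys.tail).all (fun ab => ab.1 != ab.2)) = decide ys.Nodup := by
  induction ys with
  | nil => simp
  | cons y ys ih =>
    cases ys with
    | nil => simp
    | cons z zs =>
      have hp' : (z :: zs).Pairwise (fun a b => a ≤ b) := hp.tail
      have hyz : y ≤ z := (List.pairwise_cons.mp hp).1 z (by simp)
      have hrec := ih hp'
      by_cases hzeq : y = z
      · subst hzeq
        simp [List.zip, List.nodup_cons]
      · have hne : (y != z) = true := by simp [hzeq]
        have hy_not : y ∉ z :: zs := by
          intro hmem
          rcases List.mem_cons.mp hmem with rfl | hmem'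
          · exact hzeq rfl
          · -- y ≤ z and z ≤ y (z ≤ every later element, y among them) forces y = z
            have hz_le : ∀ b ∈ zs, z ≤ b := fun b hb => (List.pairwise_cons.mp hp').1 b hb
            exact hzeq (le_antisymm hyz (hz_le y hmem'))
        simp only [List.zip, List.zipWith_cons_cons, List.all_cons, hne, Bool.true_and,
          List.tail_cons]
        rw [show (List.zipWith Prod.mk (z :: zs) zs) = ((z :: zs).zip (z :: zs).tail) by rfl]
        rw [hrec]
        simp [List.nodup_cons, hy_not]

lemma pvValidB_eq (p : String) :
    pvValidB p = decide (pvWords p).Nodup := by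
  unfold pvValidB
  set ws := pvWords p with hws
  have hperm : (PySem.List.sorted ws (fun w => w) false).Perm ws := PySem.List.sorted_perm ws _ _
  have hp : (PySem.List.sorted ws (fun w => w) false).Pairwise (fun a b => a ≤ b) :=
    PySem.List.sorted_pairwise ws (fun w => w)
  rw [adj_all_ne_of_pairwise hp]
  simp [hperm.nodup_iff]

lemma part_one_loop (phrases : List String) (acc : Int) :
    phrases.foldl
      (fun valid_phrase_count phrase =>
        let word_list := pvWords phrase
        let has_repeat := (pvAInner word_list).1
        if ¬ (has_repeat = true) then valid_phrase_count + 1 else valid_phrase_count)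
      acc
    = acc + ((phrases.countP pvValidB : Nat) : Int) := by
  induction phrases generalizing acc with
  | nil => simp
  | cons p ps ih =>
    simp only [List.foldl_cons, ih, List.countP_cons]
    by_cases h : (pvWords p).Nodup
    · simp [pvAInner_eq, pvValidB_eq, h]; omega
    · simp [pvAInner_eq, pvValidB_eq, h]

-- ===== VERDICT (by name: the statement is the Claim_ definition above) =====
theorem part_one_spec : Claim_equal_part_one := by
  intro phrases _
  unfold Spec_part_one part_one part_one_alt
  rw [part_one_loop]
  simp
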